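-- pv_equiv track=rewrite | github.com/Arafat04H09/leetcode-solutions | 2127-MaximumEmployeestoBeInvitedtoaMeeting/2127-MaximumEmployeestoBeInvitedtoaMeeting.py | get_maximum_chain_size
-- ===== SOURCE A (Python) =====
-- import collections
--
-- def get_maximum_chain_size(edges: list[int]) -> int:
--     n = len(edges)  # The total number of nodes.
--
--     def get_all_pair_circles() -> list[tuple[int, int]]:
--         # First, find all pair (two nodes) circles.
--         pairs: list[tuple[int, int]] = []
--         on_pair = set()  # store node indices already on the pair list.
--         for i in range(n):
--             if edges[edges[i]] == i and i not in on_pair: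
--                 pairs.append((i, edges[i]))
--                 on_pair.update((i, edges[i]))
--         return pairs
--
--     def get_maximum_arm_length_to(i: int, j: int) -> int:
--         """Return the maximum arm length which comes into node i except from node j."""
--
--         # Init dq with all nodes directly connected to i, expect j.
--         NodeAndArmLength = collections.namedtuple(
--             "NodeAndArmLength", ["node", "arm_length"]
--         )
--         dq: collections.deque[NodeAndArmLength] = collections.deque()
--         for node in coming_to[i]:
--             if node != j:
--                 dq.append(NodeAndArmLength(node, 1))
--
--         # Determine the longest arm length.
--         max_arm_length = 0
--         while dq:
--             node, arm_length = dq.popleft()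
--             max_arm_length = max(max_arm_length, arm_length)
--             for next_node in coming_to[node]:
--                 dq.append(NodeAndArmLength(next_node, arm_length + 1))
--         return max_arm_length
--
--     # coming_to[i] is the set of node indices who has an edge towards i.
--     coming_to: dict[int, set[int]] = collections.defaultdict(set)
--     for i in range(n):
--         coming_to[edges[i]].add(i)
--
--     return sum(
--         (
--             get_maximum_arm_length_to(a, b)
--             + get_maximum_arm_length_to(b, a)
--             + 2  # + 2 for node a and b.
--             for a, b in get_all_pair_circles()
--         )
--     )
-- ===== SOURCE B (Python) =====
-- import collections
--
-- def get_maximum_chain_size(edges: list[int]) -> int: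
--     n = len(edges)
--
--     # coming_to[v] is the set of indices whose edge points to v.
--     coming_to: dict[int, set[int]] = collections.defaultdict(set)
--     for k in range(n):
--         coming_to[edges[k]].add(k)
--
--     def depth(v: int) -> int:
--         # Length of the longest incoming chain ending at v.
--         return max((1 + depth(c) for c in coming_to[v]), default=0)
--
--     def arm(i: int, j: int) -> int:
--         # Longest incoming chain into i that does not start from j.
--         return max((1 + depth(c) for c in coming_to[i] if c != j), default=0)
--
--     total = 0
--     used: set[int] = set()
--     for i in range(n):
--         j = edges[i]
--         if edges[j] == i and i not in used:
--             used.add(i)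
--             used.add(j)
--             total += arm(i, j) + arm(j, i) + 2
--     return total
-- ===== Notes on version B (the rewrite author's own statement) =====
-- stated objective: simpler
-- what changed: Replaces A's deque/namedtuple BFS over the incoming-arm trees (and its separate pair-collection pass) by a short recursive depth function over the same reverse map, accumulating the pair sums in one loop; Pre_ only excludes entries outside [-n, n), where A's edges[edges[i]] raises IndexError.
import Mathlib
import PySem

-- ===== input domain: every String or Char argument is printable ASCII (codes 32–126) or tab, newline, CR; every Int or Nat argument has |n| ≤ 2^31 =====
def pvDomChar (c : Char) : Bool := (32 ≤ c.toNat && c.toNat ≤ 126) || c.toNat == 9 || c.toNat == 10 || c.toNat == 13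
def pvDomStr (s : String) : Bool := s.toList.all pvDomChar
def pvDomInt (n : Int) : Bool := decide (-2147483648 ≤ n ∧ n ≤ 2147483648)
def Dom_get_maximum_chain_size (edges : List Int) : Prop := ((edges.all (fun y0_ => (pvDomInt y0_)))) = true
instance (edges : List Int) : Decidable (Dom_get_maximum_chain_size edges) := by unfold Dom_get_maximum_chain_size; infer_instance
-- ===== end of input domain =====

-- B replaces A's deque BFS over incoming arms by a recursive depth function over the same
-- reverse map, accumulating the pair sums in one loop (objective: simpler).


-- ===== PORT A =====
-- the while-dq loop of get_maximum_arm_length_to; the fuel argument only makes the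
-- loop total (inside Pre_ the queue empties before the fuel runs out)
def pvA_bfs (ct : PySem.Dict Int (PySem.Set Int)) : Nat → List (Int × Int) → Int → Int
  | 0, _, maxArm => maxArm
  | _ + 1, [], maxArm => maxArm
  | fuel + 1, (node, armLength) :: dq, maxArm =>
      pvA_bfs ct fuel
        (dq ++ (ct.getD node (PySem.Set.ofList [])).map (fun nextNode => (nextNode, armLength + 1)))
        (max maxArm armLength)

-- get_maximum_arm_length_to(i, j)
def pvA_arm (ct : PySem.Dict Int (PySem.Set Int)) (n : Nat) (i j : Int) : Int :=
  pvA_bfs ct ((n + 1) ^ (n + 1))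
    (((ct.getD i (PySem.Set.ofList [])).filter (fun node => node != j)).map (fun node => (node, 1)))
    0

-- get_all_pair_circles()
def pvA_pairs (edges : List Int) : List (Int × Int) :=
  ((PySem.List.pyRange 0 edges.length 1).foldl
    (fun acc i =>
      if PySem.List.pyGetD edges (PySem.List.pyGetD edges i 0) 0 = i ∧ ¬ i ∈ acc.2 then
        (acc.1 ++ [(i, PySem.List.pyGetD edges i 0)],
         PySem.Set.add (PySem.Set.add acc.2 i) (PySem.List.pyGetD edges i 0))
      else acc)
    ([], PySem.Set.ofList [])).1

def get_maximum_chain_size (edges : List Int) : Int :=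
  let n := edges.length
  let coming_to : PySem.Dict Int (PySem.Set Int) :=
    (PySem.List.pyRange 0 n 1).foldl
      (fun d i =>
        let e := PySem.List.pyGetD edges i 0
        d.insert e (PySem.Set.add (d.getD e (PySem.Set.ofList [])) i))
      PySem.Dict.empty
  ((pvA_pairs edges).map
    (fun p => pvA_arm coming_to n p.1 p.2 + pvA_arm coming_to n p.2 p.1 + 2)).sum

-- ===== PORT B =====
-- depth(v) of Source B; the fuel argument only makes the recursion total (inside Pre_ the
-- arm trees have depth at most n, so the fuel never runs out).  Python's
-- max(gen, default=0) is ported as foldl max 0, exact here since every item is ≥ 1.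
def pvB_depth (ct : PySem.Dict Int (PySem.Set Int)) : Nat → Int → Int
  | 0, _ => 0
  | fuel + 1, v =>
      ((ct.getD v (PySem.Set.ofList [])).map (fun c => 1 + pvB_depth ct fuel c)).foldl max 0

-- arm(i, j) of Source B
def pvB_arm (ct : PySem.Dict Int (PySem.Set Int)) (n : Nat) (i j : Int) : Int :=
  (((ct.getD i (PySem.Set.ofList [])).filter (fun c => c != j)).map
    (fun c => 1 + pvB_depth ct (n + 1) c)).foldl max 0

def get_maximum_chain_size_alt (edges : List Int) : Int :=
  let n := edges.length
  let coming_to : PySem.Dict Int (PySem.Set Int) :=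
    (PySem.List.pyRange 0 n 1).foldl
      (fun d k =>
        let e := PySem.List.pyGetD edges k 0
        d.insert e (PySem.Set.add (d.getD e (PySem.Set.ofList [])) k))
      PySem.Dict.empty
  ((PySem.List.pyRange 0 n 1).foldl
    (fun acc i =>
      let j := PySem.List.pyGetD edges i 0
      if PySem.List.pyGetD edges j 0 = i ∧ ¬ i ∈ acc.2 then
        (acc.1 + pvB_arm coming_to n i j + pvB_arm coming_to n j i + 2,
         PySem.Set.add (PySem.Set.add acc.2 i) j)
      else acc)
    ((0 : Int), PySem.Set.ofList [])).1

-- ===== PRECONDITION & SPEC =====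
-- Pre_ admits exactly the inputs on which A returns: an entry outside [-n, n) makes
-- A's edges[edges[i]] raise IndexError.
def Pre_get_maximum_chain_size (edges : List Int) : Prop :=
  ∀ e ∈ edges, -(edges.length : Int) ≤ e ∧ e < (edges.length : Int)
instance (edges : List Int) : Decidable (Pre_get_maximum_chain_size edges) := by
  unfold Pre_get_maximum_chain_size; infer_instance

def pvWitness_get_maximum_chain_size : List Int := [1, 0, 0, 2, 5, 4]

def Spec_get_maximum_chain_size (edges : List Int) (out : Int) : Prop := out = get_maximum_chain_size_alt edges
instance (edges : List Int) (out : Int) : Decidable (Spec_get_maximum_chain_size edges out) := by unfold Spec_get_maximum_chain_size; infer_instance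

-- ===== CLAIM (what is proved, stated in full; the proofs are below) =====
def Claim_equal_get_maximum_chain_size : Prop := ∀ (edges : List Int), Dom_get_maximum_chain_size edges → Pre_get_maximum_chain_size edges → Spec_get_maximum_chain_size edges (get_maximum_chain_size edges)

-- ===== LEMMAS AND PROOFS =====


-- basic abbreviations for the proofs

def pvG (edges : List Int) (v : Int) : Int := PySem.List.pyGetD edges v 0

def pvIt (edges : List Int) : Nat → Int → Int
  | 0, v => v
  | t + 1, v => pvIt edges t (pvG edges v)

def pvTwoB (edges : List Int) (v : Int) : Bool := pvG edges (pvG edges v) == v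

-- v is a value an in-range Python index expression can denote
def pvNode (edges : List Int) (v : Int) : Prop :=
  -(edges.length : Int) ≤ v ∧ v < (edges.length : Int)

-- v is a plain (nonnegative) index 0 ≤ v < n
def pvSrc (edges : List Int) (v : Int) : Prop := 0 ≤ v ∧ v < (edges.length : Int)

-- t is the first step at which the forward walk from k stands on a 2-cycle node,
-- every node strictly before it being a plain index
def pvFirst (edges : List Int) (k : Int) (t : Nat) : Prop :=
  pvTwoB edges (pvIt edges t k) = true ∧
    ∀ s < t, pvTwoB edges (pvIt edges s k) = false ∧ 0 ≤ pvIt edges s k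

-- the walk from k reaches v at step t without standing on a 2-cycle node before,
-- every node strictly before the end being a plain index
def pvPassB (edges : List Int) (k : Int) (t : Nat) (v : Int) : Bool :=
  (pvIt edges t k == v) &&
    (List.range t).all (fun s => !pvTwoB edges (pvIt edges s k) && decide (0 ≤ pvIt edges s k))

noncomputable def pvIdx (edges : List Int) : Finset (Int × Nat) :=
  Finset.Ico 0 (edges.length : Int) ×ˢ Finset.range (edges.length + 1)

-- length of the longest walk that reaches v without standing on a 2-cycle node before
noncomputable def pvH (edges : List Int) (v : Int) : Nat :=
  Finset.sup ((pvIdx edges).filter (fun p => pvPassB edges p.1 p.2 v = true)) Prod.snd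

noncomputable def pvChildren (edges : List Int) (v : Int) : Finset Int :=
  (Finset.Ico 0 (edges.length : Int)).filter
    (fun u => pvG edges u = v ∧ pvTwoB edges u = false)

def pvDistF (edges : List Int) (v : Int) : Nat :=
  (((List.range (edges.length + 1)).find? (fun t => pvTwoB edges (pvIt edges t v))).getD 0)

def pvCT (edges : List Int) : PySem.Dict Int (PySem.Set Int) :=
  (PySem.List.pyRange 0 edges.length 1).foldl
    (fun d i =>
      let e := PySem.List.pyGetD edges i 0
      d.insert e (PySem.Set.add (d.getD e (PySem.Set.ofList [])) i))
    PySem.Dict.empty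

noncomputable def pvW (edges : List Int) (p : Int × Int) : Int := p.2 + (pvH edges p.1 : Int)

def pvQok (edges : List Int) (q : List (Int × Int)) : Prop :=
  ∀ p ∈ q, pvSrc edges p.1 ∧ pvTwoB edges p.1 = false ∧ ∃ d, pvFirst edges p.1 d

def pvMu (edges : List Int) (q : List (Int × Int)) : Nat :=
  (q.map (fun p => (edges.length + 1) ^ (edges.length - pvDistF edges p.1))).sum

def pvFMax {α : Type} (w : α → Int) (l : List α) (X : Int) : Int :=
  l.foldl (fun acc x => max acc (w x)) X

def pvPairsF (edges : List Int) : List Int → PySem.Set Int → List (Int × Int)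
  | [], _ => []
  | i :: l, s =>
    if pvG edges (pvG edges i) = i ∧ ¬ i ∈ s then
      (i, pvG edges i) :: pvPairsF edges l (PySem.Set.add (PySem.Set.add s i) (pvG edges i))
    else pvPairsF edges l s

def pvSeenF (edges : List Int) : List Int → PySem.Set Int → PySem.Set Int
  | [], s => s
  | i :: l, s =>
    if pvG edges (pvG edges i) = i ∧ ¬ i ∈ s then
      pvSeenF edges l (PySem.Set.add (PySem.Set.add s i) (pvG edges i))
    else pvSeenF edges l s

-- ===== basic lemmas =====

theorem pvIt_succ' (edges : List Int) (t : Nat) (v : Int) :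
    pvIt edges (t + 1) v = pvG edges (pvIt edges t v) := by
  induction t generalizing v with
  | zero => rfl
  | succ t ih => rw [pvIt]; rw [ih]; rfl

theorem pvIt_add (edges : List Int) (a b : Nat) (v : Int) :
    pvIt edges (a + b) v = pvIt edges b (pvIt edges a v) := by
  induction b with
  | zero => rfl
  | succ b ih => rw [← Nat.add_assoc, pvIt_succ', ih, pvIt_succ']

theorem pvG_node (edges : List Int) (hp : Pre_get_maximum_chain_size edges)
    (v : Int) (hv : pvNode edges v) : pvNode edges (pvG edges v) := by
  have hm : pvG edges v ∈ edges := by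
    apply PySem.List.pyGetD_mem
    unfold PySem.Raise.InRange
    obtain ⟨h1, h2⟩ := hv
    omega
  exact hp _ hm

theorem pvIt_node (edges : List Int) (hp : Pre_get_maximum_chain_size edges)
    (t : Nat) (v : Int) (hv : pvNode edges v) : pvNode edges (pvIt edges t v) := by
  induction t generalizing v with
  | zero => exact hv
  | succ t ih => rw [pvIt]; exact ih _ (pvG_node edges hp v hv)

theorem pvIt_period (edges : List Int) (k : Int) (a b : Nat) (h : pvIt edges a k = pvIt edges b k) :
    ∀ c, pvIt edges (a + c) k = pvIt edges (b + c) k := by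
  intro c; rw [pvIt_add, pvIt_add, h]

-- pigeonhole: a first hit of the 2-cycle family happens within n steps
theorem pvFirst_le (edges : List Int) (hp : Pre_get_maximum_chain_size edges)
    (k : Int) (hk : pvSrc edges k) (t : Nat) (hf : pvFirst edges k t) :
    t ≤ edges.length := by
  have hkn : pvNode edges k := ⟨by have := hk.1; omega, hk.2⟩
  have hinj : ∀ a b : Nat, a < b → b < t → pvIt edges a k ≠ pvIt edges b k := by
    intro a b hab hbt heq
    have hper := pvIt_period edges k a b heq (t - b)
    have h1 : a + (t - b) < t := by omega
    have h2 : b + (t - b) = t := by omega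
    rw [h2] at hper
    have hft := (hf.2 _ h1).1
    rw [hper, hf.1] at hft
    cases hft
  set L := (List.range t).map (fun s => pvIt edges s k) with hL
  have hnd : L.Nodup := by
    refine List.Nodup.map_on ?_ List.nodup_range
    intro x hx y hy hxy
    rcases Nat.lt_trichotomy x y with h | h | h
    · exact absurd hxy (hinj x y h (by simp at hy; omega))
    · exact h
    · exact absurd hxy.symm (hinj y x h (by simp at hx; omega))
  have hsub : L.toFinset ⊆ Finset.Ico (0 : Int) (edges.length : Int) := by
    intro x hx
    rw [List.mem_toFinset] at hx
    rw [hL, List.mem_map] at hx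
    obtain ⟨s, hsm, hs⟩ := hx
    simp only [List.mem_range] at hsm
    have hn := pvIt_node edges hp s k hkn
    have hnn := (hf.2 s hsm).2
    rw [hs] at hn hnn
    rw [Finset.mem_Ico]
    exact ⟨hnn, hn.2⟩
  have hcard := Finset.card_le_card hsub
  rw [List.toFinset_card_of_nodup hnd, Int.card_Ico] at hcard
  simp [hL] at hcard
  omega

theorem pvTwoB_child (edges : List Int) (u v : Int) (hv : pvTwoB edges v = false)
    (hg : pvG edges u = v) : pvTwoB edges u = false := by
  by_contra h
  have hb : pvTwoB edges u = true := by revert h; cases pvTwoB edges u <;> simp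
  have h1 : pvG edges (pvG edges u) = u := by simpa [pvTwoB] using hb
  have h2 : pvG edges v = u := by rw [← hg]; exact h1
  have h3 : pvTwoB edges v = true := by simp [pvTwoB, h2, hg]
  rw [hv] at h3; cases h3

theorem pvFirst_prepend (edges : List Int) (u v : Int) (d : Nat)
    (hu : pvTwoB edges u = false) (hu0 : 0 ≤ u) (hg : pvG edges u = v)
    (hf : pvFirst edges v d) : pvFirst edges u (d + 1) := by
  constructor
  · rw [pvIt, hg]; exact hf.1
  · intro s hs
    cases s with
    | zero => exact ⟨hu, hu0⟩
    | succ s => rw [pvIt, hg]; exact hf.2 s (by omega)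

-- ===== pvH lemmas =====

theorem pvPassB_self (edges : List Int) (v : Int) : pvPassB edges v 0 v = true := by
  simp [pvPassB, pvIt]

theorem pvPassB_iff (edges : List Int) (k : Int) (t : Nat) (v : Int) :
    pvPassB edges k t v = true ↔
      pvIt edges t k = v ∧
        ∀ s < t, pvTwoB edges (pvIt edges s k) = false ∧ 0 ≤ pvIt edges s k := by
  simp [pvPassB, List.all_eq_true]

theorem le_pvH (edges : List Int) (k : Int) (t : Nat) (v : Int)
    (hk : pvSrc edges k) (ht : t ≤ edges.length) (hpass : pvPassB edges k t v = true) :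
    t ≤ pvH edges v := by
  have hmem : (k, t) ∈ (pvIdx edges).filter (fun p => pvPassB edges p.1 p.2 v = true) := by
    simp [pvIdx, Finset.mem_filter, Finset.mem_Ico, hpass]
    exact ⟨⟨hk.1, hk.2⟩, by omega⟩
  exact Finset.le_sup (f := Prod.snd) hmem

theorem pvH_le (edges : List Int) (v : Int) (c : Nat)
    (h : ∀ k t, pvSrc edges k → t ≤ edges.length → pvPassB edges k t v = true → t ≤ c) :
    pvH edges v ≤ c := by
  apply Finset.sup_le
  intro p hpm
  simp only [pvIdx, Finset.mem_filter, Finset.mem_product, Finset.mem_Ico, Finset.mem_range] at hpm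
  exact h p.1 p.2 ⟨hpm.1.1.1, hpm.1.1.2⟩ (by omega) hpm.2

theorem pvH_attained (edges : List Int) (v : Int) (hv : pvSrc edges v) :
    ∃ k t, pvSrc edges k ∧ t ≤ edges.length ∧ pvPassB edges k t v = true ∧ pvH edges v = t := by
  have hne : ((pvIdx edges).filter (fun p => pvPassB edges p.1 p.2 v = true)).Nonempty := by
    refine ⟨(v, 0), ?_⟩
    simp [pvIdx, Finset.mem_filter, Finset.mem_Ico, pvPassB_self]
    exact ⟨hv.1, hv.2⟩
  obtain ⟨p, hpm, hps⟩ := Finset.exists_mem_eq_sup _ hne Prod.snd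
  simp only [pvIdx, Finset.mem_filter, Finset.mem_product, Finset.mem_Ico, Finset.mem_range] at hpm
  exact ⟨p.1, p.2, ⟨hpm.1.1.1, hpm.1.1.2⟩, by omega, hpm.2, hps⟩

-- the recurrence satisfied by pvH at nodes from which the walk does hit the 2-cycle family
theorem pvHrec (edges : List Int) (hp : Pre_get_maximum_chain_size edges)
    (v : Int) (hv : pvNode edges v) (dv : Nat) (hfv : pvFirst edges v dv) :
    pvH edges v = (pvChildren edges v).sup (fun u => pvH edges u + 1) := by
  apply le_antisymm
  · apply pvH_le
    intro k t hk ht hpass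
    rw [pvPassB_iff] at hpass
    cases t with
    | zero => exact Nat.zero_le _
    | succ s =>
      have hkn : pvNode edges k := ⟨by have := hk.1; omega, hk.2⟩
      have hu : pvIt edges s k ∈ pvChildren edges v := by
        have hn := pvIt_node edges hp s k hkn
        have hnn := (hpass.2 s (by omega)).2
        rw [pvChildren, Finset.mem_filter, Finset.mem_Ico]
        refine ⟨⟨hnn, hn.2⟩, ?_, (hpass.2 s (by omega)).1⟩
        rw [← pvIt_succ']
        exact hpass.1
      have hps : pvPassB edges k s (pvIt edges s k) = true := by
        rw [pvPassB_iff]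
        exact ⟨rfl, fun s' hs' => hpass.2 s' (by omega)⟩
      have hHu : s ≤ pvH edges (pvIt edges s k) := le_pvH edges k s _ hk (by omega) hps
      calc s + 1 ≤ pvH edges (pvIt edges s k) + 1 := by omega
        _ ≤ _ := Finset.le_sup (f := fun u => pvH edges u + 1) hu
  · apply Finset.sup_le
    intro u hu
    rw [pvChildren, Finset.mem_filter, Finset.mem_Ico] at hu
    obtain ⟨⟨hu0, hu1⟩, hgu, h2u⟩ := hu
    obtain ⟨k, t, hkn, htn, hpass, hHt⟩ := pvH_attained edges u ⟨hu0, hu1⟩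
    rw [pvPassB_iff] at hpass
    have hpass' : pvPassB edges k (t + 1) v = true := by
      rw [pvPassB_iff]
      constructor
      · rw [pvIt_succ', hpass.1, hgu]
      · intro s hs
        by_cases h : s < t
        · exact hpass.2 s h
        · have hst : s = t := by omega
          subst hst
          rw [hpass.1]
          exact ⟨h2u, hu0⟩
    have hfk : pvFirst edges k (t + 1 + dv) := by
      constructor
      · rw [pvIt_add]
        have h1 : pvIt edges (t + 1) k = v := by rw [pvIt_succ', hpass.1, hgu]
        rw [h1]
        exact hfv.1
      · intro s hs
        by_cases h : s < t + 1
        · rw [pvPassB_iff] at hpass'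
          exact hpass'.2 s h
        · have he : s = (t + 1) + (s - (t + 1)) := by omega
          rw [he, pvIt_add]
          have h1 : pvIt edges (t + 1) k = v := by rw [pvIt_succ', hpass.1, hgu]
          rw [h1]
          exact hfv.2 _ (by omega)
    have hb := pvFirst_le edges hp k hkn _ hfk
    have hle := le_pvH edges k (t + 1) v hkn (by omega) hpass'
    omega

-- ===== coming_to characterization =====

theorem mem_ctfold (edges : List Int) :
    ∀ (l : List Int) (d : PySem.Dict Int (PySem.Set Int)) (u v : Int),
      (u ∈ (l.foldl (fun d i =>
          let e := PySem.List.pyGetD edges i 0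
          d.insert e (PySem.Set.add (d.getD e (PySem.Set.ofList [])) i)) d).getD v (PySem.Set.ofList [])
        ↔ u ∈ d.getD v (PySem.Set.ofList []) ∨ (u ∈ l ∧ pvG edges u = v)) := by
  intro l
  induction l with
  | nil => intro d u v; simp
  | cons i l ih =>
    intro d u v
    rw [List.foldl_cons, ih]
    simp only [PySem.Dict.getD_insert]
    by_cases hv : v = PySem.List.pyGetD edges i 0
    · subst hv
      rw [if_pos rfl]
      rw [PySem.Set.mem_add]
      constructor
      · rintro ((h | h) | h)
        · exact Or.inl h
        · exact Or.inr ⟨by rw [h]; exact List.mem_cons_self, by rw [h]; rfl⟩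
        · exact Or.inr ⟨List.mem_cons_of_mem _ h.1, h.2⟩
      · rintro (h | ⟨hm, hg⟩)
        · exact Or.inl (Or.inl h)
        · rcases List.mem_cons.mp hm with h | h
          · subst h; exact Or.inl (Or.inr rfl)
          · exact Or.inr ⟨h, hg⟩
    · rw [if_neg hv]
      constructor
      · rintro (h | h)
        · exact Or.inl h
        · exact Or.inr ⟨List.mem_cons_of_mem _ h.1, h.2⟩
      · rintro (h | ⟨hm, hg⟩)
        · exact Or.inl h
        · rcases List.mem_cons.mp hm with h | h
          · exact absurd (by rw [← hg, h]; rfl) hv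
          · exact Or.inr ⟨h, hg⟩

theorem mem_pvCT (edges : List Int) (u v : Int) :
    u ∈ (pvCT edges).getD v (PySem.Set.ofList []) ↔
      (0 ≤ u ∧ u < (edges.length : Int)) ∧ pvG edges u = v := by
  unfold pvCT
  rw [mem_ctfold]
  rw [PySem.List.mem_pyRange_one]
  simp [PySem.Dict.getD_empty]

theorem nodup_ctfold (edges : List Int) :
    ∀ (l : List Int) (d : PySem.Dict Int (PySem.Set Int)),
      (∀ v', ((d.getD v' (PySem.Set.ofList [])).Nodup)) →
      ∀ v, ((l.foldl (fun d i =>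
          let e := PySem.List.pyGetD edges i 0
          d.insert e (PySem.Set.add (d.getD e (PySem.Set.ofList [])) i)) d).getD v (PySem.Set.ofList [])).Nodup := by
  intro l
  induction l with
  | nil => intro d h v; exact h v
  | cons i l ih =>
    intro d h v
    rw [List.foldl_cons]
    apply ih
    intro v'
    simp only [PySem.Dict.getD_insert]
    by_cases hv : v' = PySem.List.pyGetD edges i 0
    · rw [if_pos hv]; exact PySem.Set.nodup_add _ _ (h _)
    · rw [if_neg hv]; exact h v'

theorem nodup_pvCT (edges : List Int) (v : Int) :
    ((pvCT edges).getD v (PySem.Set.ofList [])).Nodup := by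
  unfold pvCT
  apply nodup_ctfold
  intro v'
  rw [PySem.Dict.getD_empty]
  exact PySem.Set.nodup_ofList []

-- ===== children characterizations =====

-- for a non-2-cycle node, its coming_to list is exactly pvChildren
theorem pvCT_children (edges : List Int) (v : Int) (h2 : pvTwoB edges v = false) :
    ∀ u, u ∈ (pvCT edges).getD v (PySem.Set.ofList []) ↔ u ∈ pvChildren edges v := by
  intro u
  rw [mem_pvCT, pvChildren, Finset.mem_filter, Finset.mem_Ico]
  constructor
  · rintro ⟨hn, hg⟩
    exact ⟨⟨hn.1, hn.2⟩, hg, pvTwoB_child edges u v h2 hg⟩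
  · rintro ⟨hn, hg, _⟩
    exact ⟨⟨hn.1, hn.2⟩, hg⟩

-- for a 2-cycle node i with partner j, coming_to[i] minus j is exactly pvChildren i
theorem pvArm_children (edges : List Int) (i j : Int)
    (h2 : pvTwoB edges i = true) (hj : j = pvG edges i) :
    ∀ u, (u ∈ ((pvCT edges).getD i (PySem.Set.ofList [])).filter (fun node => node != j)
      ↔ u ∈ pvChildren edges i) := by
  have hgj : pvG edges j = i := by rw [hj]; simpa [pvTwoB] using h2
  have h2j : pvTwoB edges j = true := by
    rw [pvTwoB, hgj]
    rw [hj]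
    simp
  intro u
  rw [List.mem_filter, mem_pvCT, pvChildren, Finset.mem_filter, Finset.mem_Ico, bne_iff_ne]
  constructor
  · rintro ⟨⟨hn, hg⟩, hne⟩
    refine ⟨hn, hg, ?_⟩
    by_contra h2u
    have hbu : pvTwoB edges u = true := by revert h2u; cases pvTwoB edges u <;> simp
    have : pvG edges (pvG edges u) = u := by simpa [pvTwoB] using hbu
    rw [hg] at this
    exact hne (by rw [← this, hj])
  · rintro ⟨hn, hg, h2u⟩
    refine ⟨⟨hn, hg⟩, ?_⟩
    intro he
    have : pvTwoB edges u = true := by rw [he]; exact h2j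
    rw [h2u] at this; cases this

-- ===== fold-max helpers =====

theorem pvFMax_init_max {α : Type} (w : α → Int) (l : List α) (a b : Int) :
    pvFMax w l (max a b) = max (pvFMax w l a) b := by
  induction l generalizing a with
  | nil => rfl
  | cons x l ih => simp only [pvFMax, List.foldl] at *; rw [max_right_comm, ih]

theorem le_pvFMax_init {α : Type} (w : α → Int) (l : List α) (X : Int) :
    X ≤ pvFMax w l X := by
  induction l generalizing X with
  | nil => exact le_refl _
  | cons x l ih => exact le_trans (le_max_left _ _) (ih _)

theorem le_pvFMax_mem {α : Type} (w : α → Int) (l : List α) (X : Int) (x : α) (hx : x ∈ l) :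
    w x ≤ pvFMax w l X := by
  induction l generalizing X with
  | nil => cases hx
  | cons y l ih =>
    rcases List.mem_cons.mp hx with h | h
    · subst h; exact le_trans (le_max_right _ _) (le_pvFMax_init _ _ _)
    · exact ih (max X (w y)) h

theorem pvFMax_le {α : Type} (w : α → Int) (l : List α) (X c : Int)
    (hX : X ≤ c) (h : ∀ x ∈ l, w x ≤ c) : pvFMax w l X ≤ c := by
  induction l generalizing X with
  | nil => exact hX
  | cons x l ih =>
    exact ih _ (max_le hX (h x List.mem_cons_self)) (fun y hy => h y (List.mem_cons_of_mem _ hy))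

theorem pvFMax_congr {α : Type} (w w' : α → Int) (l : List α) (X : Int)
    (h : ∀ x ∈ l, w x = w' x) : pvFMax w l X = pvFMax w' l X := by
  induction l generalizing X with
  | nil => rfl
  | cons x l ih =>
    simp only [pvFMax, List.foldl] at *
    rw [h x List.mem_cons_self, ih _ (fun y hy => h y (List.mem_cons_of_mem _ hy))]

theorem pvFoldl_max_map {α : Type} (w : α → Int) (l : List α) (X : Int) :
    (l.map w).foldl max X = pvFMax w l X := by
  rw [List.foldl_map]; rfl

-- the common step: a fold-max of (1 + pvH u) over a list equal (as a set) to pvChildren v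
-- computes pvH v, given pvHrec's recurrence at v
theorem pvFMax_children (edges : List Int) (v : Int) (L : List Int)
    (hmem : ∀ u, u ∈ L ↔ u ∈ pvChildren edges v)
    (hrec : pvH edges v = (pvChildren edges v).sup (fun u => pvH edges u + 1)) :
    pvFMax (fun u => 1 + (pvH edges u : Int)) L 0 = (pvH edges v : Int) := by
  apply le_antisymm
  · apply pvFMax_le
    · positivity
    · intro u hu
      have hle : pvH edges u + 1 ≤ pvH edges v := by
        rw [hrec]
        exact Finset.le_sup (f := fun u => pvH edges u + 1) ((hmem u).mp hu)
      have := Nat.cast_le (α := Int) |>.mpr hle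
      push_cast at this
      omega
  · rcases Finset.eq_empty_or_nonempty (pvChildren edges v) with hce | hcn
    · rw [hce] at hrec
      simp only [Finset.sup_empty] at hrec
      rw [hrec]
      show ((0 : Nat) : Int) ≤ _
      rw [Nat.cast_zero]
      exact le_pvFMax_init _ _ _
    · obtain ⟨u0, hu0m, hu0s⟩ := Finset.exists_mem_eq_sup _ hcn (fun u => pvH edges u + 1)
      have hle := le_pvFMax_mem (fun u => 1 + (pvH edges u : Int)) L 0 u0 ((hmem u0).mpr hu0m)
      apply le_trans _ hle
      rw [hrec, hu0s]
      push_cast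
      omega

-- ===== the BFS invariant (A side) =====

theorem find?_range_first (p : Nat → Bool) (m d : Nat) (hdm : d < m) (hd : p d = true)
    (hmin : ∀ s < d, p s = false) : (List.range m).find? p = some d := by
  induction m with
  | zero => omega
  | succ m ih =>
    rw [List.range_succ, List.find?_append]
    by_cases h : d < m
    · rw [ih h]; rfl
    · have hdm' : d = m := by omega
      have hnone : (List.range m).find? p = none := by
        rw [List.find?_eq_none]
        intro x hx
        simp only [List.mem_range] at hx
        simp [hmin x (by omega)]
      rw [hnone]
      subst hdm'
      simp [hd]

theorem pvDistF_eq (edges : List Int) (v : Int) (d : Nat) (hf : pvFirst edges v d)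
    (hd : d ≤ edges.length) : pvDistF edges v = d := by
  unfold pvDistF
  rw [find?_range_first _ _ d (by omega) hf.1 (fun s hs => (hf.2 s hs).1)]
  rfl

theorem pvLen_le (n : Nat) (L : List Int) (hnd : L.Nodup)
    (hb : ∀ x ∈ L, 0 ≤ x ∧ x < (n : Int)) : L.length ≤ n := by
  have hsub : L.toFinset ⊆ Finset.Ico (0 : Int) (n : Int) := by
    intro x hx
    rw [List.mem_toFinset] at hx
    rw [Finset.mem_Ico]
    exact hb x hx
  have hcard := Finset.card_le_card hsub
  rw [List.toFinset_card_of_nodup hnd, Int.card_Ico] at hcard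
  omega

-- one BFS step over the children of a popped node
theorem pvStep_children (edges : List Int) (hp : Pre_get_maximum_chain_size edges)
    (v : Int) (hv : pvNode edges v) (h2v : pvTwoB edges v = false)
    (dv : Nat) (hfv : pvFirst edges v dv) (X d : Int) :
    pvFMax (pvW edges) (((pvCT edges).getD v (PySem.Set.ofList [])).map (fun u => (u, d + 1))) (max X d)
      = max X (d + (pvH edges v : Int)) := by
  have hrec := pvHrec edges hp v hv dv hfv
  apply le_antisymm
  · apply pvFMax_le
    · apply max_le (le_max_left _ _)
      have : (0 : Int) ≤ (pvH edges v : Int) := by positivity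
      apply le_trans _ (le_max_right _ _)
      omega
    · intro x hx
      rw [List.mem_map] at hx
      obtain ⟨u, hu, hxu⟩ := hx
      rw [mem_pvCT] at hu
      have h2u : pvTwoB edges u = false := pvTwoB_child edges u v h2v hu.2
      have humem : u ∈ pvChildren edges v := by
        rw [pvChildren, Finset.mem_filter, Finset.mem_Ico]
        exact ⟨hu.1, hu.2, h2u⟩
      have hle : pvH edges u + 1 ≤ pvH edges v := by
        rw [hrec]
        exact Finset.le_sup (f := fun u => pvH edges u + 1) humem
      subst hxu
      show (d + 1) + (pvH edges u : Int) ≤ _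
      apply le_trans _ (le_max_right _ _)
      omega
  · apply max_le
    · exact le_trans (le_max_left _ _) (le_pvFMax_init _ _ _)
    · rcases Finset.eq_empty_or_nonempty (pvChildren edges v) with hce | hcn
      · rw [hce] at hrec
        simp only [Finset.sup_empty] at hrec
        rw [hrec]
        show d + ((0 : Nat) : Int) ≤ _
        rw [Nat.cast_zero, add_zero]
        exact le_trans (le_max_right _ _) (le_pvFMax_init _ _ _)
      · obtain ⟨u0, hu0m, hu0s⟩ := Finset.exists_mem_eq_sup _ hcn (fun u => pvH edges u + 1)
        rw [pvChildren, Finset.mem_filter, Finset.mem_Ico] at hu0m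
        have hu0C : u0 ∈ ((pvCT edges).getD v (PySem.Set.ofList [])) := by
          rw [mem_pvCT]
          exact ⟨hu0m.1, hu0m.2.1⟩
        have hmem : (u0, d + 1) ∈ ((pvCT edges).getD v (PySem.Set.ofList [])).map (fun u => (u, d + 1)) :=
          List.mem_map_of_mem hu0C
        have := le_pvFMax_mem (pvW edges) _ (max X d) _ hmem
        apply le_trans _ this
        show d + (pvH edges v : Int) ≤ (d + 1) + (pvH edges u0 : Int)
        rw [hrec, hu0s]
        push_cast
        omega

theorem pvA_bfs_inv (edges : List Int) (hp : Pre_get_maximum_chain_size edges) :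
    ∀ (fuel : Nat) (q : List (Int × Int)) (m : Int), pvQok edges q → pvMu edges q ≤ fuel →
      pvA_bfs (pvCT edges) fuel q m = pvFMax (pvW edges) q m := by
  intro fuel
  induction fuel with
  | zero =>
    intro q m hok hmu
    cases q with
    | nil => rfl
    | cons p rest =>
      exfalso
      have hpos : 0 < (edges.length + 1) ^ (edges.length - pvDistF edges p.1) :=
        Nat.pow_pos (by omega)
      simp only [pvMu, List.map_cons, List.sum_cons] at hmu
      omega
  | succ fuel ih =>
    intro q m hok hmu
    cases q with
    | nil => rfl
    | cons p rest =>
      obtain ⟨v, d⟩ := p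
      obtain ⟨hvn, hv2, dn, hvf⟩ := hok (v, d) List.mem_cons_self
      have hvnode : pvNode edges v := ⟨by have := hvn.1; omega, hvn.2⟩
      have hdn : dn ≤ edges.length := pvFirst_le edges hp v hvn dn hvf
      have hdv : pvDistF edges v = dn := pvDistF_eq edges v dn hvf hdn
      set C := (pvCT edges).getD v (PySem.Set.ofList []) with hC
      have hCmem : ∀ u ∈ C, (0 ≤ u ∧ u < (edges.length : Int)) ∧ pvG edges u = v := by
        intro u hu; rw [hC, mem_pvCT] at hu; exact hu
      have hClen : C.length ≤ edges.length :=
        pvLen_le edges.length C (nodup_pvCT edges v) (fun x hx => (hCmem x hx).1)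
      have hChild : ∀ u ∈ C, pvSrc edges u ∧ pvTwoB edges u = false ∧ pvFirst edges u (dn + 1) := by
        intro u hu
        obtain ⟨hun, hug⟩ := hCmem u hu
        have h2u := pvTwoB_child edges u v hv2 hug
        exact ⟨hun, h2u, pvFirst_prepend edges u v dn h2u hun.1 hug hvf⟩
      have hok' : pvQok edges (rest ++ C.map (fun u => (u, d + 1))) := by
        intro p hp'
        rcases List.mem_append.mp hp' with h | h
        · exact hok p (List.mem_cons_of_mem _ h)
        · rw [List.mem_map] at h
          obtain ⟨u, hu, hpu⟩ := h
          obtain ⟨h1, h2, h3⟩ := hChild u hu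
          subst hpu
          exact ⟨h1, h2, dn + 1, h3⟩
      have hmuC : pvMu edges (C.map (fun u => (u, d + 1)))
          = C.length * (edges.length + 1) ^ (edges.length - (dn + 1)) := by
        unfold pvMu
        rw [List.map_map]
        have hcg : ∀ u ∈ C, ((fun p => (edges.length + 1) ^ (edges.length - pvDistF edges p.1)) ∘
            (fun u => (u, d + 1))) u = (edges.length + 1) ^ (edges.length - (dn + 1)) := by
          intro u hu
          obtain ⟨h1, h2, h3⟩ := hChild u hu
          have hb := pvFirst_le edges hp u h1 (dn + 1) h3
          have : pvDistF edges u = dn + 1 := pvDistF_eq edges u (dn + 1) h3 hb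
          simp [this]
        rw [List.map_congr_left hcg, List.map_const', List.sum_replicate, smul_eq_mul]
      have hsplit : pvMu edges ((v, d) :: rest)
          = (edges.length + 1) ^ (edges.length - dn) + pvMu edges rest := by
        simp [pvMu, hdv]
      have happ : pvMu edges (rest ++ C.map (fun u => (u, d + 1)))
          = pvMu edges rest + pvMu edges (C.map (fun u => (u, d + 1))) := by
        simp [pvMu]
      have hmu' : pvMu edges (rest ++ C.map (fun u => (u, d + 1))) ≤ fuel := by
        rcases List.eq_nil_or_concat C with hCe | ⟨C', u', hCc⟩
        · rw [happ, hCe]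
          have hpos : 0 < (edges.length + 1) ^ (edges.length - dn) := Nat.pow_pos (by omega)
          rw [hsplit] at hmu
          have h0 : pvMu edges (([] : List Int).map (fun u => (u, d + 1))) = 0 := rfl
          omega
        · have hu'C : u' ∈ C := by
            rw [hCc]
            simp
          obtain ⟨h1, h2, h3⟩ := hChild u' hu'C
          have hdn1 : dn + 1 ≤ edges.length := pvFirst_le edges hp u' h1 (dn + 1) h3
          have hpow : (edges.length + 1) ^ (edges.length - dn)
              = (edges.length + 1) ^ (edges.length - (dn + 1)) * (edges.length + 1) := by
            rw [← pow_succ]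
            congr 1
            omega
          have hp1 : 0 < (edges.length + 1) ^ (edges.length - (dn + 1)) :=
            Nat.pow_pos (by omega)
          have hCb : C.length * (edges.length + 1) ^ (edges.length - (dn + 1))
              ≤ edges.length * (edges.length + 1) ^ (edges.length - (dn + 1)) :=
            Nat.mul_le_mul_right _ hClen
          rw [hsplit] at hmu
          rw [happ, hmuC]
          rw [hpow] at hmu
          nlinarith
      have hbfs : pvA_bfs (pvCT edges) (fuel + 1) ((v, d) :: rest) m
          = pvA_bfs (pvCT edges) fuel (rest ++ C.map (fun u => (u, d + 1))) (max m d) := rfl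
      rw [hbfs, ih _ _ hok' hmu']
      show pvFMax (pvW edges) (rest ++ C.map (fun u => (u, d + 1))) (max m d)
        = pvFMax (pvW edges) rest (max m (pvW edges (v, d)))
      have hfapp : pvFMax (pvW edges) (rest ++ C.map (fun u => (u, d + 1))) (max m d)
          = pvFMax (pvW edges) (C.map (fun u => (u, d + 1))) (pvFMax (pvW edges) rest (max m d)) := by
        unfold pvFMax
        rw [List.foldl_append]
      rw [hfapp, pvFMax_init_max]
      rw [pvStep_children edges hp v hvnode hv2 dn hvf]
      show _ = pvFMax (pvW edges) rest (max m (d + (pvH edges v : Int)))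
      rw [pvFMax_init_max]

theorem pvA_arm_eq (edges : List Int) (hp : Pre_get_maximum_chain_size edges)
    (i j : Int) (hi : pvNode edges i) (h2 : pvTwoB edges i = true) (hj : j = pvG edges i) :
    pvA_arm (pvCT edges) edges.length i j = (pvH edges i : Int) := by
  have hfi : pvFirst edges i 0 := ⟨h2, fun s hs => absurd hs (by omega)⟩
  set L := ((pvCT edges).getD i (PySem.Set.ofList [])).filter (fun node => node != j) with hL
  have hLmem : ∀ u, u ∈ L ↔ u ∈ pvChildren edges i := pvArm_children edges i j h2 hj
  have hChild : ∀ u ∈ L, pvSrc edges u ∧ pvTwoB edges u = false ∧ pvFirst edges u 1 := by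
    intro u hu
    rw [hLmem, pvChildren, Finset.mem_filter, Finset.mem_Ico] at hu
    exact ⟨⟨hu.1.1, hu.1.2⟩, hu.2.2,
      pvFirst_prepend edges u i 0 hu.2.2 hu.1.1 hu.2.1 hfi⟩
  have hok : pvQok edges (L.map (fun u => (u, 1))) := by
    intro p hp'
    rw [List.mem_map] at hp'
    obtain ⟨u, hu, hpu⟩ := hp'
    obtain ⟨ha, hb, hc⟩ := hChild u hu
    subst hpu
    exact ⟨ha, hb, 1, hc⟩
  have hLlen : L.length ≤ edges.length := by
    apply pvLen_le edges.length L ((nodup_pvCT edges i).filter _)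
    intro x hx
    rw [hLmem, pvChildren, Finset.mem_filter, Finset.mem_Ico] at hx
    exact hx.1
  have hmu : pvMu edges (L.map (fun u => (u, 1)))
      ≤ (edges.length + 1) ^ (edges.length + 1) := by
    unfold pvMu
    rw [List.map_map]
    have hcg : ∀ u ∈ L, ((fun p => (edges.length + 1) ^ (edges.length - pvDistF edges p.1)) ∘
        (fun u => (u, (1 : Int)))) u = (edges.length + 1) ^ (edges.length - 1) := by
      intro u hu
      obtain ⟨ha, hb, hc⟩ := hChild u hu
      have hble := pvFirst_le edges hp u ha 1 hc
      have : pvDistF edges u = 1 := pvDistF_eq edges u 1 hc hble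
      simp [this]
    rw [List.map_congr_left hcg, List.map_const', List.sum_replicate, smul_eq_mul]
    calc L.length * (edges.length + 1) ^ (edges.length - 1)
        ≤ (edges.length + 1) * (edges.length + 1) ^ (edges.length - 1) :=
          Nat.mul_le_mul_right _ (by omega)
      _ = (edges.length + 1) ^ (edges.length - 1 + 1) := by rw [pow_succ]; ring
      _ ≤ (edges.length + 1) ^ (edges.length + 1) :=
          Nat.pow_le_pow_right (by omega) (by omega)
  have harm : pvA_arm (pvCT edges) edges.length i j
      = pvFMax (pvW edges) (L.map (fun u => (u, 1))) 0 := by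
    unfold pvA_arm
    rw [← hL]
    exact pvA_bfs_inv edges hp _ _ _ hok hmu
  rw [harm]
  have hrec := pvHrec edges hp i hi 0 hfi
  apply le_antisymm
  · apply pvFMax_le
    · positivity
    · intro x hx
      rw [List.mem_map] at hx
      obtain ⟨u, hu, hxu⟩ := hx
      have humem : u ∈ pvChildren edges i := (hLmem u).mp hu
      have hle : pvH edges u + 1 ≤ pvH edges i := by
        rw [hrec]
        exact Finset.le_sup (f := fun u => pvH edges u + 1) humem
      subst hxu
      show (1 : Int) + (pvH edges u : Int) ≤ _
      omega
  · rcases Finset.eq_empty_or_nonempty (pvChildren edges i) with hce | hcn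
    · rw [hce] at hrec
      simp only [Finset.sup_empty] at hrec
      rw [hrec]
      show ((0 : Nat) : Int) ≤ _
      rw [Nat.cast_zero]
      exact le_pvFMax_init _ _ _
    · obtain ⟨u0, hu0m, hu0s⟩ := Finset.exists_mem_eq_sup _ hcn (fun u => pvH edges u + 1)
      have hmem : (u0, (1 : Int)) ∈ L.map (fun u => (u, (1 : Int))) :=
        List.mem_map_of_mem ((hLmem u0).mpr hu0m)
      have hw := le_pvFMax_mem (pvW edges) _ 0 _ hmem
      apply le_trans _ hw
      show (pvH edges i : Int) ≤ 1 + (pvH edges u0 : Int)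
      rw [hrec, hu0s]
      push_cast
      omega

-- ===== B side: the recursive depth computes pvH =====

theorem pvB_depth_eq (edges : List Int) (hp : Pre_get_maximum_chain_size edges) :
    ∀ (fuel : Nat) (d : Nat) (v : Int), pvSrc edges v → pvTwoB edges v = false →
      pvFirst edges v d → edges.length + 2 ≤ fuel + d →
      pvB_depth (pvCT edges) fuel v = (pvH edges v : Int) := by
  intro fuel
  induction fuel with
  | zero =>
    intro d v hv h2 hf hle
    have := pvFirst_le edges hp v hv d hf
    omega
  | succ fuel ih =>
    intro d v hv h2 hf hle
    have hnode : pvNode edges v := ⟨by have := hv.1; omega, hv.2⟩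
    have hrec := pvHrec edges hp v hnode d hf
    have hm := pvCT_children edges v h2
    rw [pvB_depth, pvFoldl_max_map]
    rw [pvFMax_congr _ (fun u => 1 + (pvH edges u : Int)) _ 0 ?_]
    · exact pvFMax_children edges v _ hm hrec
    · intro u hu
      rw [hm, pvChildren, Finset.mem_filter, Finset.mem_Ico] at hu
      obtain ⟨⟨hu0, hu1⟩, hug, h2u⟩ := hu
      have hfu : pvFirst edges u (d + 1) := pvFirst_prepend edges u v d h2u hu0 hug hf
      rw [ih (d + 1) u ⟨hu0, hu1⟩ h2u hfu (by omega)]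

theorem pvB_arm_eq (edges : List Int) (hp : Pre_get_maximum_chain_size edges)
    (i j : Int) (hi : pvNode edges i) (h2 : pvTwoB edges i = true) (hj : j = pvG edges i) :
    pvB_arm (pvCT edges) edges.length i j = (pvH edges i : Int) := by
  have hfi : pvFirst edges i 0 := ⟨h2, fun s hs => absurd hs (by omega)⟩
  have hrec := pvHrec edges hp i hi 0 hfi
  have hLmem : ∀ u, u ∈ ((pvCT edges).getD i (PySem.Set.ofList [])).filter (fun c => c != j)
      ↔ u ∈ pvChildren edges i := pvArm_children edges i j h2 hj
  unfold pvB_arm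
  rw [pvFoldl_max_map]
  rw [pvFMax_congr _ (fun u => 1 + (pvH edges u : Int)) _ 0 ?_]
  · exact pvFMax_children edges i _ hLmem hrec
  · intro u hu
    rw [hLmem, pvChildren, Finset.mem_filter, Finset.mem_Ico] at hu
    obtain ⟨⟨hu0, hu1⟩, hug, h2u⟩ := hu
    have hfu : pvFirst edges u 1 := pvFirst_prepend edges u i 0 h2u hu0 hug hfi
    rw [pvB_depth_eq edges hp (edges.length + 1) 1 u ⟨hu0, hu1⟩ h2u hfu (by omega)]

-- ===== the two pair loops =====

theorem pvAfold (edges : List Int) :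
    ∀ (l : List Int) (P : List (Int × Int)) (s : PySem.Set Int),
      (l.foldl (fun acc i =>
          if PySem.List.pyGetD edges (PySem.List.pyGetD edges i 0) 0 = i ∧ ¬ i ∈ acc.2 then
            (acc.1 ++ [(i, PySem.List.pyGetD edges i 0)],
             PySem.Set.add (PySem.Set.add acc.2 i) (PySem.List.pyGetD edges i 0))
          else acc) (P, s))
        = (P ++ pvPairsF edges l s, pvSeenF edges l s) := by
  intro l
  induction l with
  | nil => intro P s; simp [pvPairsF, pvSeenF]
  | cons i l ih =>
    intro P s
    have hred : (if PySem.List.pyGetD edges (PySem.List.pyGetD edges i 0) 0 = i ∧ ¬ i ∈ (P, s).2 then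
          ((P, s).1 ++ [(i, PySem.List.pyGetD edges i 0)],
           PySem.Set.add (PySem.Set.add (P, s).2 i) (PySem.List.pyGetD edges i 0))
        else (P, s))
      = (if PySem.List.pyGetD edges (PySem.List.pyGetD edges i 0) 0 = i ∧ ¬ i ∈ s then
          (P ++ [(i, PySem.List.pyGetD edges i 0)],
           PySem.Set.add (PySem.Set.add s i) (PySem.List.pyGetD edges i 0))
        else (P, s)) := rfl
    rw [List.foldl_cons, hred, pvPairsF, pvSeenF]
    by_cases h : PySem.List.pyGetD edges (PySem.List.pyGetD edges i 0) 0 = i ∧ ¬ i ∈ s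
    · have h' : pvG edges (pvG edges i) = i ∧ ¬ i ∈ s := h
      rw [if_pos h, if_pos h', if_pos h', ih]
      simp [pvG]
    · have h' : ¬ (pvG edges (pvG edges i) = i ∧ ¬ i ∈ s) := h
      rw [if_neg h, if_neg h', if_neg h', ih]

theorem pvA_pairs_eq (edges : List Int) :
    pvA_pairs edges = pvPairsF edges (PySem.List.pyRange 0 edges.length 1) (PySem.Set.ofList []) := by
  unfold pvA_pairs
  rw [pvAfold]
  simp

theorem pvBfold (edges : List Int) :
    ∀ (l : List Int) (T : Int) (s : PySem.Set Int),
      (l.foldl (fun acc i =>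
          let j := PySem.List.pyGetD edges i 0
          if PySem.List.pyGetD edges j 0 = i ∧ ¬ i ∈ acc.2 then
            (acc.1 + pvB_arm (pvCT edges) edges.length i j + pvB_arm (pvCT edges) edges.length j i + 2,
             PySem.Set.add (PySem.Set.add acc.2 i) j)
          else acc) (T, s))
        = (T + ((pvPairsF edges l s).map
            (fun p => pvB_arm (pvCT edges) edges.length p.1 p.2
              + pvB_arm (pvCT edges) edges.length p.2 p.1 + 2)).sum,
           pvSeenF edges l s) := by
  intro l
  induction l with
  | nil => intro T s; simp [pvPairsF, pvSeenF]
  | cons i l ih =>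
    intro T s
    have hred : (if PySem.List.pyGetD edges (PySem.List.pyGetD edges i 0) 0 = i ∧ ¬ i ∈ (T, s).2 then
          ((T, s).1 + pvB_arm (pvCT edges) edges.length i (PySem.List.pyGetD edges i 0)
             + pvB_arm (pvCT edges) edges.length (PySem.List.pyGetD edges i 0) i + 2,
           PySem.Set.add (PySem.Set.add (T, s).2 i) (PySem.List.pyGetD edges i 0))
        else (T, s))
      = (if PySem.List.pyGetD edges (PySem.List.pyGetD edges i 0) 0 = i ∧ ¬ i ∈ s then
          (T + pvB_arm (pvCT edges) edges.length i (PySem.List.pyGetD edges i 0)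
             + pvB_arm (pvCT edges) edges.length (PySem.List.pyGetD edges i 0) i + 2,
           PySem.Set.add (PySem.Set.add s i) (PySem.List.pyGetD edges i 0))
        else (T, s)) := rfl
    rw [List.foldl_cons, hred, pvPairsF, pvSeenF]
    by_cases h : PySem.List.pyGetD edges (PySem.List.pyGetD edges i 0) 0 = i ∧ ¬ i ∈ s
    · have h' : pvG edges (pvG edges i) = i ∧ ¬ i ∈ s := h
      rw [if_pos h, if_pos h', if_pos h', ih]
      simp only [List.map_cons, List.sum_cons, pvG]
      refine Prod.ext ?_ rfl
      show T + _ + _ + 2 + _ = _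
      ring
    · have h' : ¬ (pvG edges (pvG edges i) = i ∧ ¬ i ∈ s) := h
      rw [if_neg h, if_neg h', if_neg h', ih]

theorem pvB_total_eq (edges : List Int) :
    get_maximum_chain_size_alt edges =
      ((pvPairsF edges (PySem.List.pyRange 0 edges.length 1) (PySem.Set.ofList [])).map
        (fun p => pvB_arm (pvCT edges) edges.length p.1 p.2
          + pvB_arm (pvCT edges) edges.length p.2 p.1 + 2)).sum := by
  show ((PySem.List.pyRange 0 edges.length 1).foldl (fun acc i =>
      let j := PySem.List.pyGetD edges i 0
      if PySem.List.pyGetD edges j 0 = i ∧ ¬ i ∈ acc.2 then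
        (acc.1 + pvB_arm (pvCT edges) edges.length i j + pvB_arm (pvCT edges) edges.length j i + 2,
         PySem.Set.add (PySem.Set.add acc.2 i) j)
      else acc) ((0 : Int), PySem.Set.ofList [])).1 = _
  rw [pvBfold]
  show 0 + _ = _
  rw [zero_add]

theorem mem_pvPairsF (edges : List Int) :
    ∀ (l : List Int) (s : PySem.Set Int) (p : Int × Int), p ∈ pvPairsF edges l s →
      pvG edges (pvG edges p.1) = p.1 ∧ p.2 = pvG edges p.1 ∧ p.1 ∈ l := by
  intro l
  induction l with
  | nil => intro s p h; cases h
  | cons i l ih =>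
    intro s p h
    rw [pvPairsF] at h
    split at h
    · rcases List.mem_cons.mp h with h | h
      · subst h; rename_i hc; exact ⟨hc.1, rfl, List.mem_cons_self⟩
      · obtain ⟨h1, h2, h3⟩ := ih _ _ h; exact ⟨h1, h2, List.mem_cons_of_mem _ h3⟩
    · obtain ⟨h1, h2, h3⟩ := ih _ _ h; exact ⟨h1, h2, List.mem_cons_of_mem _ h3⟩

-- ===== VERDICT (by name: the statement is the Claim_ definition above) =====
theorem get_maximum_chain_size_spec : Claim_equal_get_maximum_chain_size := by
  intro edges _ hpre
  show get_maximum_chain_size edges = get_maximum_chain_size_alt edges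
  have hA : get_maximum_chain_size edges
      = ((pvA_pairs edges).map
          (fun p => pvA_arm (pvCT edges) edges.length p.1 p.2
            + pvA_arm (pvCT edges) edges.length p.2 p.1 + 2)).sum := rfl
  rw [hA, pvB_total_eq, pvA_pairs_eq]
  congr 1
  apply List.map_congr_left
  intro p hpm
  obtain ⟨hg2, hb, hmem⟩ := mem_pvPairsF edges _ _ p hpm
  rw [PySem.List.mem_pyRange_one] at hmem
  have han : pvNode edges p.1 := ⟨by have := hmem.1; omega, hmem.2⟩
  have h2a : pvTwoB edges p.1 = true := by simp [pvTwoB, hg2]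
  have hbn : pvNode edges p.2 := by rw [hb]; exact pvG_node edges hpre _ han
  have hgb : pvG edges p.2 = p.1 := by rw [hb]; exact hg2
  have h2b : pvTwoB edges p.2 = true := by
    rw [pvTwoB, hgb, hb]
    simp
  rw [pvA_arm_eq edges hpre p.1 p.2 han h2a hb,
      pvA_arm_eq edges hpre p.2 p.1 hbn h2b hgb.symm,
      pvB_arm_eq edges hpre p.1 p.2 han h2a hb,
      pvB_arm_eq edges hpre p.2 p.1 hbn h2b hgb.symm]
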